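-- pv_equiv track=rewrite | github.com/softkleenex/arc-prize-2025-gold | direct_matcher.py | scale_grid
-- ===== SOURCE A (Python) =====
-- from typing import List, Dict, Tuple, Optional, Any
--
-- def scale_grid(grid: List[List], factor: int) -> List[List]:
--     """Scale grid by integer factor"""
--     h, w = len(grid), len(grid[0])
--     result = [[0] * (w * factor) for _ in range(h * factor)]
--
--     for i in range(h):
--         for j in range(w):
--             val = grid[i][j]
--             for di in range(factor):
--                 for dj in range(factor):
--                     result[i * factor + di][j * factor + dj] = val
--
--     return result
-- ===== SOURCE B (Python) =====
-- def scale_grid(grid, factor):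
--     """Scale grid by integer factor"""
--     result = []
--     for row in grid:
--         expanded = [v for v in row for _ in range(factor)]
--         for _ in range(factor):
--             result.append(list(expanded))
--     return result
-- ===== Notes on version B (the rewrite author's own statement) =====
-- stated objective: simpler
-- what changed: Replaces the preallocated matrix filled cell-by-cell through a four-deep index-assignment loop with a single pass that expands each row once and appends factor copies of it (bulk list building instead of per-cell indexed writes).
-- outside the precondition, e.g. on scale_grid([[1], [2, 3]], 1): A returns [[1], [2]], B returns [[1], [2, 3]]
import Mathlib
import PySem

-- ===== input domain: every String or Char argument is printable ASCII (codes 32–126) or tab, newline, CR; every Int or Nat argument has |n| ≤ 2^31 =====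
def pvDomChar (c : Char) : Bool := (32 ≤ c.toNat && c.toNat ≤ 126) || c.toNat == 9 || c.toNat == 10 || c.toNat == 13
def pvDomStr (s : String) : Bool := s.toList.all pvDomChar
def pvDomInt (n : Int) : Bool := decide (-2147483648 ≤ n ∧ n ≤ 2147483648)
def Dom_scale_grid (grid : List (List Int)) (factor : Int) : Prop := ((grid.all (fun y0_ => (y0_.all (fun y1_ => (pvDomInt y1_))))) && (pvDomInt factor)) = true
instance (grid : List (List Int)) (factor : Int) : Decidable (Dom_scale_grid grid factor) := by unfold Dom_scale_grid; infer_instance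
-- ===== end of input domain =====

-- B replaces A's preallocated matrix and four-deep index assignment by expanding each
-- row once and appending factor copies of it (objective: simpler; return value only,
-- neither version mutates its arguments).

-- ===== PORT A =====
def scale_grid (grid : List (List Int)) (factor : Int) : List (List Int) :=
  let h := grid.length
  let w := (grid.headD []).length
  let result := List.replicate ((h * factor).toNat) (List.replicate (((w : Int) * factor).toNat) (0 : Int))
  (List.range h).foldl (fun res i =>
    (List.range w).foldl (fun res j =>
      let val := (grid.getD i []).getD j 0
      (List.range factor.toNat).foldl (fun res di =>
        (List.range factor.toNat).foldl (fun res dj =>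
          res.modify (i * factor.toNat + di) (fun row => row.set (j * factor.toNat + dj) val)) res) res) res) result

-- ===== PORT B =====
def scale_grid_alt (grid : List (List Int)) (factor : Int) : List (List Int) :=
  grid.flatMap (fun row =>
    List.replicate factor.toNat (row.flatMap (fun v => List.replicate factor.toNat v)))

-- ===== PRECONDITION & SPEC =====
-- Pre_ excludes the empty grid and grids with a row shorter than the first (A raises
-- IndexError there) and, for positive factor only, grids with a row longer than the
-- first: on that malformed input A silently truncates the row to the first row's
-- width while B expands it whole, both defensible readings (for factor <= 0 both
-- return [] on any such grid, so those stay inside).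
def Pre_scale_grid (grid : List (List Int)) (factor : Int) : Prop :=
  grid ≠ [] ∧ (∀ row ∈ grid, (grid.headD []).length ≤ row.length) ∧
    (0 < factor → ∀ row ∈ grid, row.length = (grid.headD []).length)
instance (grid : List (List Int)) (factor : Int) : Decidable (Pre_scale_grid grid factor) := by
  unfold Pre_scale_grid; infer_instance

def pvWitness_scale_grid : List (List Int) × Int := ([[1, 2], [3, 4]], 2)

def Spec_scale_grid (grid : List (List Int)) (factor : Int) (out : List (List Int)) : Prop := out = scale_grid_alt grid factor
instance (grid : List (List Int)) (factor : Int) (out : List (List Int)) : Decidable (Spec_scale_grid grid factor out) := by unfold Spec_scale_grid; infer_instance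

-- ===== CLAIM (what is proved, stated in full; the proofs are below) =====
def Claim_equal_scale_grid : Prop := ∀ (grid : List (List Int)) (factor : Int), Dom_scale_grid grid factor → Pre_scale_grid grid factor → Spec_scale_grid grid factor (scale_grid grid factor)

-- ===== LEMMAS AND PROOFS =====

-- modify at an index past a prefix acts on the suffix
theorem pv_modify_append_right {α : Type} (s t : List α) (k : Nat) (g : α → α) :
    (s ++ t).modify (s.length + k) g = s ++ t.modify k g := by
  induction s with
  | nil => simp
  | cons a s ih => simpa [Nat.succ_add] using ih

-- a fold of modifications of ONE row is the modification by the folded row function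
theorem pv_fold_modify_same {α : Type} (l : List Nat) (r : Nat)
    (g : Nat → α → α) (m : List α) :
    l.foldl (fun m dj => m.modify r (g dj)) m
      = m.modify r (fun row => l.foldl (fun row dj => g dj row) row) := by
  induction l generalizing m with
  | nil => exact (List.modify_id _ _).symm
  | cons x l ih =>
    rw [List.foldl_cons, ih, List.modify_modify_eq]
    simp only [List.foldl_cons]
    rfl

-- the innermost dj-loop: writing v at positions pre.length + 0 … pre.length + f - 1
theorem pv_fold_set_block (f : Nat) (pre suf : List Int) (c : Nat) (v : Int)
    (hc : c = pre.length) (hf : f ≤ suf.length) :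
    (List.range f).foldl (fun r dj => r.set (c + dj) v) (pre ++ suf)
      = pre ++ List.replicate f v ++ suf.drop f := by
  subst hc
  induction f generalizing pre suf with
  | zero => simp
  | succ f ih =>
    rw [List.range_succ, List.foldl_append]
    rw [ih _ _ (Nat.le_of_succ_le hf)]
    simp only [List.foldl_cons, List.foldl_nil]
    rw [List.append_assoc, List.set_append_right _ _ (by simp)]
    rw [show pre.length + f - pre.length = f by omega]
    rw [List.set_append_right _ _ (by simp)]
    simp only [List.length_replicate, Nat.sub_self]
    have hdrop : suf.drop f = suf[f] :: suf.drop (f + 1) :=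
      List.drop_eq_getElem_cons (by omega)
    rw [hdrop, List.set_cons_zero, List.replicate_succ' (n := f)]
    simp [List.append_assoc]

-- the di-loop: applies g once to each of the first f copies in the middle block
theorem pv_fold_modify_block (f n : Nat) (done rest : List (List Int))
    (p : List Int) (g : List Int → List Int) (c : Nat)
    (hc : c = done.length) (hf : f ≤ n) :
    (List.range f).foldl (fun m di => m.modify (c + di) g)
        (done ++ List.replicate n p ++ rest)
      = done ++ List.replicate f (g p) ++ List.replicate (n - f) p ++ rest := by
  subst hc
  induction f with
  | zero => simp
  | succ f ih =>
    rw [List.range_succ, List.foldl_append, ih (Nat.le_of_succ_le hf)]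
    simp only [List.foldl_cons, List.foldl_nil]
    have hrep : List.replicate (n - f) p = p :: List.replicate (n - (f + 1)) p := by
      have : n - f = (n - (f + 1)) + 1 := by omega
      rw [this, List.replicate_succ]
    rw [List.append_assoc (done ++ List.replicate f (g p)),
        show done.length + f = (done ++ List.replicate f (g p)).length + 0 by simp,
        pv_modify_append_right, hrep, List.cons_append, List.modify_zero_cons]
    simp [List.replicate_succ' (n := f), List.append_assoc]

-- the j-loop for one source row i (dj-loop already folded into one row update):
-- builds the expanded row inside all f copies of the block
theorem pv_fold_row (f : Nat) (row : List Int) (n j0 : Nat)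
    (done rest : List (List Int)) (pre suf : List Int) (c : Nat)
    (hc : c = done.length)
    (hpre : pre.length = j0 * f) (hsuf : n * f ≤ suf.length)
    (hn : j0 + n ≤ row.length) :
    (List.range' j0 n).foldl (fun res j =>
        (List.range f).foldl (fun res di =>
          res.modify (c + di) (fun r =>
            (List.range f).foldl (fun r dj => r.set (j * f + dj) (row.getD j 0)) r)) res)
      (done ++ List.replicate f (pre ++ suf) ++ rest)
      = done ++ List.replicate f (pre ++ ((row.drop j0).take n).flatMap
          (fun v => List.replicate f v) ++ suf.drop (n * f)) ++ rest := by
  subst hc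
  induction n generalizing j0 pre suf with
  | zero => simp
  | succ n ih =>
    rw [List.range'_succ, List.foldl_cons]
    rw [pv_fold_modify_block f f done rest (pre ++ suf) _ done.length rfl (Nat.le_refl f)]
    simp only [Nat.sub_self, List.replicate_zero, List.append_nil]
    have hset : (List.range f).foldl
        (fun r dj => r.set (j0 * f + dj) (row.getD j0 0)) (pre ++ suf)
        = pre ++ List.replicate f (row.getD j0 0) ++ suf.drop f :=
      pv_fold_set_block f pre suf (j0 * f) (row.getD j0 0) hpre.symm (by nlinarith)
    rw [hset]
    rw [ih (j0 + 1) (pre ++ List.replicate f (row.getD j0 0)) (suf.drop f)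
        (by simp [hpre]; ring)
        (by simpa using Nat.le_sub_of_add_le (by nlinarith : n * f + f ≤ suf.length))
        (by omega)]
    have hrow : row.drop j0 = row[j0] :: row.drop (j0 + 1) :=
      List.drop_eq_getElem_cons (by omega)
    have hget : row.getD j0 0 = row[j0] := List.getD_eq_getElem row 0 (by omega)
    rw [hget, hrow, List.take_succ_cons, List.flatMap_cons]
    simp only [List.drop_drop, List.append_assoc]
    rw [show f + n * f = (n + 1) * f by ring]

-- the i-loop: each source row becomes f copies of its expansion
theorem pv_fold_grid (f w : Nat) (grid : List (List Int)) (n i0 : Nat)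
    (done : List (List Int))
    (hdone : done.length = i0 * f)
    (hrows : ∀ i, i0 ≤ i → i < i0 + n → (grid.getD i []).length = w)
    (hn : i0 + n ≤ grid.length) :
    (List.range' i0 n).foldl (fun res i =>
        (List.range w).foldl (fun res j =>
          (List.range f).foldl (fun res di =>
            res.modify (i * f + di) (fun r =>
              (List.range f).foldl (fun r dj =>
                r.set (j * f + dj) ((grid.getD i []).getD j 0)) r)) res) res)
      (done ++ List.replicate (n * f) (List.replicate (w * f) (0 : Int)))
      = done ++ ((grid.drop i0).take n).flatMap
          (fun row => List.replicate f (row.flatMap (fun v => List.replicate f v))) := by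
  induction n generalizing i0 done with
  | zero => simp
  | succ n ih =>
    rw [List.range'_succ, List.foldl_cons]
    have hsplit : List.replicate ((n + 1) * f) (List.replicate (w * f) (0 : Int))
        = List.replicate f (List.replicate (w * f) (0 : Int))
          ++ List.replicate (n * f) (List.replicate (w * f) (0 : Int)) := by
      rw [← List.replicate_add]; ring_nf
    rw [hsplit, ← List.append_assoc]
    have hrw : (grid.getD i0 []).length = w := hrows i0 (Nat.le_refl _) (by omega)
    have step := pv_fold_row f (grid.getD i0 []) w 0 done
        (List.replicate (n * f) (List.replicate (w * f) (0 : Int)))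
        [] (List.replicate (w * f) (0 : Int)) (i0 * f)
        hdone.symm (by simp) (by simp [Nat.mul_comm]) (by omega)
    simp only [List.nil_append] at step
    rw [← List.range_eq_range'] at step
    rw [step]
    simp only [List.drop_zero, List.take_of_length_le (le_of_eq hrw),
      List.drop_replicate, Nat.sub_self, List.replicate_zero, List.append_nil]
    have hdrop : grid.drop i0 = grid[i0] :: grid.drop (i0 + 1) :=
      List.drop_eq_getElem_cons (by omega)
    rw [ih (i0 + 1)
        (done ++ List.replicate f ((grid.getD i0 []).flatMap (fun v => List.replicate f v)))
        (by simp [hdone]; ring)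
        (fun i h1 h2 => hrows i (by omega) (by omega)) (by omega)]
    rw [hdrop, List.take_succ_cons, List.flatMap_cons]
    simp [List.getD, List.getElem?_eq_getElem (show i0 < grid.length by omega),
      List.append_assoc]

-- ===== VERDICT (by name: the statement is the Claim_ definition above) =====
theorem scale_grid_spec : Claim_equal_scale_grid := by
  intro grid factor _ hpre
  obtain ⟨hne, -, hrectp⟩ := hpre
  simp only [Spec_scale_grid, scale_grid, scale_grid_alt]
  by_cases hfac : factor ≤ 0
  · -- factor ≤ 0: A's preallocation is empty and no write happens; B emits no copies
    have hf0 : factor.toNat = 0 := by omega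
    have hneg : ((grid.length : Int)) * factor ≤ 0 := by
      nlinarith [Int.natCast_nonneg grid.length]
    have hh0 : ((grid.length : Int) * factor).toNat = 0 := by omega
    simp [hf0, hh0]
  · have hrect := hrectp (by omega)
    have hf : (0 : Int) ≤ factor := by omega
    have hcast : (factor : Int) = ((factor.toNat : Nat) : Int) :=
      (Int.toNat_of_nonneg hf).symm
    have hh : ((grid.length : Int) * factor).toNat = grid.length * factor.toNat := by
      conv_lhs => rw [hcast]
      rw [← Nat.cast_mul, Int.toNat_natCast]
    have hw : (((grid.headD []).length : Int) * factor).toNat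
        = (grid.headD []).length * factor.toNat := by
      conv_lhs => rw [hcast]
      rw [← Nat.cast_mul, Int.toNat_natCast]
    rw [hh, hw]
    simp only [pv_fold_modify_same]
    have main := pv_fold_grid factor.toNat (grid.headD []).length grid grid.length 0 []
      (by simp)
      (fun i _ hi => by
        have hi' : i < grid.length := by omega
        rw [List.getD_eq_getElem grid [] hi']
        exact hrect _ (List.getElem_mem hi'))
      (by simp)
    simp only [List.nil_append, List.drop_zero, List.take_length] at main
    rw [← List.range_eq_range'] at main
    rw [main]
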